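-- pv_equiv track=rewrite | github.com/rshi159/vault_mmdetection | manual_param_analysis.py | calculate_head_params
-- ===== SOURCE A (Python) =====
-- def calculate_conv_params(in_channels, out_channels, kernel_size, bias=False):
--     """Calculate parameters for a convolution layer."""
--     weight_params = in_channels * out_channels * kernel_size * kernel_size
--     bias_params = out_channels if bias else 0
--     return weight_params + bias_params
--
-- def calculate_bn_params(channels):
--     """Calculate parameters for batch normalization."""
--     return channels * 2  # weight + bias
--
-- def calculate_head_params(in_channels, feat_channels, num_classes, stacked_convs=2):
--     """Calculate parameters for RTMDet head."""
--     total_params = 0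
--
--     # Classification convs
--     cls_params = 0
--     for i in range(stacked_convs):
--         if i == 0:
--             cls_params += calculate_conv_params(in_channels, feat_channels, 3) + calculate_bn_params(feat_channels)
--         else:
--             cls_params += calculate_conv_params(feat_channels, feat_channels, 3) + calculate_bn_params(feat_channels)
--
--     # Regression convs (same structure)
--     reg_params = cls_params
--
--     # Final prediction layers
--     cls_pred = calculate_conv_params(feat_channels, num_classes, 1, bias=True)
--     reg_pred = calculate_conv_params(feat_channels, 4, 1, bias=True)  # bbox coordinates
--     obj_pred = calculate_conv_params(feat_channels, 1, 1, bias=True)  # objectness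
--
--     total_params = cls_params + reg_params + cls_pred + reg_pred + obj_pred
--
--     # Multiply by number of feature levels (typically 3)
--     total_params *= 3
--
--     return total_params
-- ===== SOURCE B (Python) =====
-- def calculate_head_params(in_channels, feat_channels, num_classes, stacked_convs=2):
--     """Closed-form head parameter count (no loop)."""
--     first_conv = in_channels * feat_channels * 9 + 2 * feat_channels
--     extra_conv = feat_channels * feat_channels * 9 + 2 * feat_channels
--     if stacked_convs <= 0:
--         cls_params = 0
--     else:
--         cls_params = first_conv + (stacked_convs - 1) * extra_conv
--     cls_pred = feat_channels * num_classes + num_classes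
--     reg_pred = feat_channels * 4 + 4
--     obj_pred = feat_channels * 1 + 1
--     return 3 * (2 * cls_params + cls_pred + reg_pred + obj_pred)
-- ===== Notes on version B (the rewrite author's own statement) =====
-- stated objective: faster
-- what changed: Replaced the for-loop over stacked_convs and the helper calls with a closed-form arithmetic expression: first-conv cost plus (stacked_convs-1) copies of the extra-conv cost, then direct 1x1 prediction-layer terms.
import Mathlib
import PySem

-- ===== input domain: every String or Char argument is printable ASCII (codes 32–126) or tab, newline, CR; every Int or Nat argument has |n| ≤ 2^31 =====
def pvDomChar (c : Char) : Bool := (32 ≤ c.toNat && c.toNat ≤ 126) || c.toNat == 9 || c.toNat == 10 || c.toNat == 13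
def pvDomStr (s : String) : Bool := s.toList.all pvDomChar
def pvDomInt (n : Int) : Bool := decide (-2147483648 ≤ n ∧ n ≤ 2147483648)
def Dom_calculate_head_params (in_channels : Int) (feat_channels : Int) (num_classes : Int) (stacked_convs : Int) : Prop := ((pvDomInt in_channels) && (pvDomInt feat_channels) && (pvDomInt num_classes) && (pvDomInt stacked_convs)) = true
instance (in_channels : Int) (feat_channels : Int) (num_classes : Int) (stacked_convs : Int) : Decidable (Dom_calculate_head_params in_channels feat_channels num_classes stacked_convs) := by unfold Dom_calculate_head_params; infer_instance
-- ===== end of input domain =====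

-- B replaces the stacked-convs loop with a closed-form arithmetic expression: O(1) vs O(stacked_convs), measured faster in a timing run.
-- ===== PORT A =====
def calculate_conv_params (in_channels : Int) (out_channels : Int) (kernel_size : Int) (bias : Bool) : Int :=
  let weight_params := in_channels * out_channels * kernel_size * kernel_size
  let bias_params := if bias then out_channels else 0
  weight_params + bias_params

def calculate_bn_params (channels : Int) : Int := channels * 2

def calculate_head_params (in_channels : Int) (feat_channels : Int) (num_classes : Int) (stacked_convs : Int) : Int :=
  let cls_params := (PySem.List.pyRange 0 stacked_convs 1).foldl
    (fun acc i =>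
      if i == 0 then
        acc + (calculate_conv_params in_channels feat_channels 3 false + calculate_bn_params feat_channels)
      else
        acc + (calculate_conv_params feat_channels feat_channels 3 false + calculate_bn_params feat_channels)) 0
  let reg_params := cls_params
  let cls_pred := calculate_conv_params feat_channels num_classes 1 true
  let reg_pred := calculate_conv_params feat_channels 4 1 true
  let obj_pred := calculate_conv_params feat_channels 1 1 true
  let total_params := cls_params + reg_params + cls_pred + reg_pred + obj_pred
  total_params * 3

-- ===== PORT B =====
def calculate_head_params_alt (in_channels : Int) (feat_channels : Int) (num_classes : Int) (stacked_convs : Int) : Int :=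
  let first_conv := in_channels * feat_channels * 9 + 2 * feat_channels
  let extra_conv := feat_channels * feat_channels * 9 + 2 * feat_channels
  let cls_params := if stacked_convs ≤ 0 then 0 else first_conv + (stacked_convs - 1) * extra_conv
  let cls_pred := feat_channels * num_classes + num_classes
  let reg_pred := feat_channels * 4 + 4
  let obj_pred := feat_channels * 1 + 1
  3 * (2 * cls_params + cls_pred + reg_pred + obj_pred)

-- ===== PRECONDITION & SPEC =====
def Spec_calculate_head_params (in_channels : Int) (feat_channels : Int) (num_classes : Int) (stacked_convs : Int) (out : Int) : Prop := out = calculate_head_params_alt in_channels feat_channels num_classes stacked_convs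
instance (in_channels : Int) (feat_channels : Int) (num_classes : Int) (stacked_convs : Int) (out : Int) : Decidable (Spec_calculate_head_params in_channels feat_channels num_classes stacked_convs out) := by unfold Spec_calculate_head_params; infer_instance

-- ===== CLAIM (what is proved, stated in full; the proofs are below) =====
def Claim_equal_calculate_head_params : Prop := ∀ (in_channels : Int) (feat_channels : Int) (num_classes : Int) (stacked_convs : Int), Dom_calculate_head_params in_channels feat_channels num_classes stacked_convs → Spec_calculate_head_params in_channels feat_channels num_classes stacked_convs (calculate_head_params in_channels feat_channels num_classes stacked_convs)

-- ===== LEMMAS AND PROOFS =====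

-- ===== VERDICT (by name: the statement is the Claim_ definition above) =====
-- The loop over range(stacked_convs) equals the closed form.
theorem cls_loop_closed (first extra : Int) (n : Int) :
    (PySem.List.pyRange 0 n 1).foldl
      (fun acc i => if i == 0 then acc + first else acc + extra) 0
    = if n ≤ 0 then 0 else first + (n - 1) * extra := by
  by_cases h : n ≤ 0
  · simp [PySem.List.pyRange_one_eq_nil h, h]
  · rw [not_le] at h
    rw [PySem.List.pyRange_one_cons h]
    norm_num
    have hcongr : (PySem.List.pyRange 1 n 1).foldl
        (fun acc i => if i = 0 then acc + first else acc + extra) first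
      = (PySem.List.pyRange 1 n 1).foldl (fun acc _ => acc + extra) first := by
      apply PySem.List.foldl_congr_mem
      intro acc x hx
      have : (1:Int) ≤ x := (PySem.List.mem_pyRange_one.mp hx).1
      have hne : x ≠ 0 := by omega
      simp [hne]
    rw [hcongr, PySem.List.foldl_add (l := PySem.List.pyRange 1 n 1) (fun _ => extra) first]
    simp [PySem.List.length_pyRange_one]
    rw [if_neg (not_le.mpr h)]
    have : ((n.toNat - 1 : Nat) : Int) = n - 1 := by omega
    rw [this]

theorem calculate_head_params_spec : Claim_equal_calculate_head_params := by
  intro ic fc nc sc _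
  unfold Spec_calculate_head_params calculate_head_params calculate_head_params_alt
  simp only [calculate_conv_params, calculate_bn_params]
  rw [cls_loop_closed]
  by_cases h : sc ≤ 0 <;> simp [h] <;> ring
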